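-- pv_equiv track=rewrite | github.com/SaraFlht/OwlInferenceExplainer.java | scripts/llm_pipeline/run_nl_with_explanations.py | select_best_explanation
-- ===== SOURCE A (Python) =====
-- def select_best_explanation(explanations_list):
--     """Select explanation with highest number of tags (most complex reasoning)"""
--     if not explanations_list:
--         return "No explanation available"
--
--     best_explanation = ""
--     max_tags = 0
--
--     for explanation in explanations_list:
--         if isinstance(explanation, list):
--             # Count tags in explanation
--             tag_count = sum(1 for item in explanation if isinstance(item, str) and item.startswith("TAG:"))
--             if tag_count > max_tags:
--                 max_tags = tag_count
--                 # Convert to natural language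
--                 steps = [item for item in explanation if not (isinstance(item, str) and item.startswith("TAG:"))]
--                 best_explanation = ". ".join(steps) if steps else ""
--
--     return best_explanation if best_explanation else "Reasoning available but details unclear"
-- ===== SOURCE B (Python) =====
-- def select_best_explanation(explanations_list):
--     """Select explanation with highest number of tags (most complex reasoning)"""
--     if not explanations_list:
--         return "No explanation available"
--
--     def tag_count(e):
--         return sum(1 for item in e if isinstance(item, str) and item.startswith("TAG:"))
--
--     counts = [tag_count(e) for e in explanations_list]
--     best_count = max(counts)
--     if best_count == 0:
--         return "Reasoning available but details unclear"
--
--     winner = next(e for e in explanations_list if tag_count(e) == best_count)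
--     steps = [item for item in winner if not (isinstance(item, str) and item.startswith("TAG:"))]
--     text = ". ".join(steps)
--     return text if text else "Reasoning available but details unclear"
-- ===== Notes on version B (the rewrite author's own statement) =====
-- stated objective: simpler
-- what changed: Two-phase decomposition: first compute all tag counts and take the maximum, then locate the first explanation attaining it and format only that winner, instead of A's running-max loop that re-formats every new best candidate along the way.
import Mathlib
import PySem

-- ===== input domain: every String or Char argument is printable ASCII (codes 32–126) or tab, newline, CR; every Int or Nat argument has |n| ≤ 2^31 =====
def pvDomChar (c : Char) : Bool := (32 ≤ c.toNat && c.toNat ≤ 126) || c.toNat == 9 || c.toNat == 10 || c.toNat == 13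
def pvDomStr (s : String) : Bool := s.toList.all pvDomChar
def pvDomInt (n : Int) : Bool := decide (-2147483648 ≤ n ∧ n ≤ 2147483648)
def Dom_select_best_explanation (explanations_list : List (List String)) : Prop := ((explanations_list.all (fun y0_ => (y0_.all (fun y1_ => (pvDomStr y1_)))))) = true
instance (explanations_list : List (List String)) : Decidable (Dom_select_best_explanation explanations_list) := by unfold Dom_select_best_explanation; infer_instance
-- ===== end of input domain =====

-- B: two-phase rewrite (compute counts + max, then format only the winning explanation); simpler, same cost.
-- ===== PORT A =====
-- shared helper: both Pythons count items starting with "TAG:" by the same sum-of-generator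
def pvTagCount (e : List String) : Nat :=
  e.foldl (fun a it => if PySem.Str.startswith it "TAG:" then a + 1 else a) 0

def pvFmt (e : List String) : String :=
  if e.filter (fun it => !(PySem.Str.startswith it "TAG:")) ≠ [] then
    PySem.Str.join ". " (e.filter (fun it => !(PySem.Str.startswith it "TAG:")))
  else ""

def pvStepA (st : String × Nat) (e : List String) : String × Nat :=
  let c := pvTagCount e
  if st.2 < c then (pvFmt e, c) else st

def select_best_explanation (explanations_list : List (List String)) : String :=
  if explanations_list = [] then "No explanation available"
  else
    let st := explanations_list.foldl pvStepA ("", 0)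
    if st.1 ≠ "" then st.1 else "Reasoning available but details unclear"

-- ===== PORT B =====
def select_best_explanation_alt (explanations_list : List (List String)) : String :=
  if explanations_list = [] then "No explanation available"
  else
    let counts := explanations_list.map pvTagCount
    let best_count := counts.foldl max 0      -- max(counts), the running-max library max
    if best_count = 0 then "Reasoning available but details unclear"
    else
      -- next(...): the generator is guaranteed nonempty (best_count > 0), getD [] is unreachable
      let winner := (explanations_list.find? (fun e => pvTagCount e == best_count)).getD []
      let text := PySem.Str.join ". " (winner.filter (fun it => !(PySem.Str.startswith it "TAG:")))
      if text ≠ "" then text else "Reasoning available but details unclear"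

-- ===== PRECONDITION & SPEC =====
def Spec_select_best_explanation (explanations_list : List (List String)) (out : String) : Prop := out = select_best_explanation_alt explanations_list
instance (explanations_list : List (List String)) (out : String) : Decidable (Spec_select_best_explanation explanations_list out) := by unfold Spec_select_best_explanation; infer_instance

-- ===== CLAIM (what is proved, stated in full; the proofs are below) =====
def Claim_equal_select_best_explanation : Prop := ∀ (explanations_list : List (List String)), Dom_select_best_explanation explanations_list → Spec_select_best_explanation explanations_list (select_best_explanation explanations_list)

-- ===== LEMMAS AND PROOFS =====

def pvMx (xs : List (List String)) (m : Nat) : Nat :=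
  xs.foldl (fun a e => max a (pvTagCount e)) m

lemma pvMx_ge (xs : List (List String)) (m : Nat) : m ≤ pvMx xs m := by
  induction xs generalizing m with
  | nil => simp [pvMx]
  | cons x t ih =>
      have := ih (max m (pvTagCount x))
      simp [pvMx, List.foldl] at this ⊢
      omega

lemma pvFoldA_char (xs : List (List String)) (b : String) (m : Nat) :
    xs.foldl pvStepA (b, m) =
      if pvMx xs m ≤ m then (b, m)
      else (pvFmt ((xs.find? (fun e => pvTagCount e == pvMx xs m)).getD []), pvMx xs m) := by
  induction xs generalizing b m with
  | nil => simp [pvMx]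
  | cons x t ih =>
      have hM : pvMx (x :: t) m = pvMx t (max m (pvTagCount x)) := by simp [pvMx]
      by_cases h : m < pvTagCount x
      · have hmx : max m (pvTagCount x) = pvTagCount x := by omega
        have hge : pvTagCount x ≤ pvMx t (pvTagCount x) := pvMx_ge t _
        rw [List.foldl_cons]
        have hstep : pvStepA (b, m) x = (pvFmt x, pvTagCount x) := by
          simp [pvStepA, h]
        rw [hstep, ih]
        by_cases h2 : pvMx t (pvTagCount x) ≤ pvTagCount x
        · have hEq : pvMx t (pvTagCount x) = pvTagCount x := le_antisymm h2 hge
          have hgt : ¬ pvMx (x :: t) m ≤ m := by rw [hM, hmx, hEq]; omega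
          rw [if_pos h2, if_neg hgt]
          have hfind : (x :: t).find? (fun e => pvTagCount e == pvMx (x :: t) m) = some x := by
            rw [List.find?_cons_of_pos]
            simp [hM, hmx, hEq]
          rw [hfind]
          simp [hM, hmx, hEq]
        · have hlt : pvTagCount x < pvMx t (pvTagCount x) := by omega
          have hgt : ¬ pvMx (x :: t) m ≤ m := by rw [hM, hmx]; omega
          rw [if_neg h2, if_neg hgt]
          have hfind : (x :: t).find? (fun e => pvTagCount e == pvMx (x :: t) m)
              = t.find? (fun e => pvTagCount e == pvMx (x :: t) m) := by
            rw [List.find?_cons_of_neg]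
            simp [hM, hmx]; omega
          rw [hfind, hM, hmx]
      · have hmx : max m (pvTagCount x) = m := by omega
        rw [List.foldl_cons]
        have hstep : pvStepA (b, m) x = (b, m) := by simp [pvStepA, h]
        rw [hstep, ih, hM, hmx]
        by_cases h2 : pvMx t m ≤ m
        · rw [if_pos h2, if_pos h2]
        · rw [if_neg h2, if_neg h2]
          have hfind : (x :: t).find? (fun e => pvTagCount e == pvMx t m)
              = t.find? (fun e => pvTagCount e == pvMx t m) := by
            rw [List.find?_cons_of_neg]
            simp; omega
          rw [hfind]

lemma pvJoin_nil : PySem.Str.join ". " [] = "" := by decide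

lemma pvFmt_eq_join (e : List String) :
    pvFmt e = PySem.Str.join ". " (e.filter (fun it => !(PySem.Str.startswith it "TAG:"))) := by
  unfold pvFmt
  split_ifs with h
  · rfl
  · rw [not_ne_iff] at h
    rw [h, pvJoin_nil]

lemma pvMax_foldl_map (xs : List (List String)) :
    (xs.map pvTagCount).foldl max 0 = pvMx xs 0 := by
  simp [pvMx, List.foldl_map]

-- ===== VERDICT (by name: the statement is the Claim_ definition above) =====
theorem select_best_explanation_spec : Claim_equal_select_best_explanation := by
  intro l _
  unfold Spec_select_best_explanation select_best_explanation select_best_explanation_alt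
  by_cases hnil : l = []
  · simp [hnil]
  · simp only [if_neg hnil, pvFoldA_char, pvMax_foldl_map, ← pvFmt_eq_join]
    by_cases h0 : pvMx l 0 ≤ 0
    · have h0' : pvMx l 0 = 0 := by omega
      simp [h0']
    · have h0' : ¬ pvMx l 0 = 0 := by omega
      simp [h0, h0']
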